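-- pv_equiv track=rewrite | github.com/BeyzaInsider/-dev | ödev1.py | bolunen_sayi_bulma
-- ===== SOURCE A (Python) =====
-- def bolunen_sayi_bulma(min_sayi, max_sayi, bolen_sayi):
--     tam_bolunenler = []
--     sayi_adedi = 0
--
--
--     for sayi in range(min_sayi, max_sayi + 1):
--         if sayi % bolen_sayi == 0:
--             tam_bolunenler = tam_bolunenler + [sayi]
--             sayi_adedi = sayi_adedi + 1
--
--     return tam_bolunenler, sayi_adedi
-- ===== SOURCE B (Python) =====
-- def bolunen_sayi_bulma(min_sayi, max_sayi, bolen_sayi):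
--     if min_sayi > max_sayi:
--         return [], 0
--     step = abs(bolen_sayi)
--     start = min_sayi + (-min_sayi) % step
--     tam_bolunenler = list(range(start, max_sayi + 1, step))
--     return tam_bolunenler, len(tam_bolunenler)
-- ===== Notes on version B (the rewrite author's own statement) =====
-- stated objective: faster
-- what changed: Instead of scanning every integer in [min,max] and testing divisibility, B jumps to the first multiple of |bolen_sayi| at or above min_sayi and enumerates multiples directly with a stepped range, taking the count as the list length.
import Mathlib
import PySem

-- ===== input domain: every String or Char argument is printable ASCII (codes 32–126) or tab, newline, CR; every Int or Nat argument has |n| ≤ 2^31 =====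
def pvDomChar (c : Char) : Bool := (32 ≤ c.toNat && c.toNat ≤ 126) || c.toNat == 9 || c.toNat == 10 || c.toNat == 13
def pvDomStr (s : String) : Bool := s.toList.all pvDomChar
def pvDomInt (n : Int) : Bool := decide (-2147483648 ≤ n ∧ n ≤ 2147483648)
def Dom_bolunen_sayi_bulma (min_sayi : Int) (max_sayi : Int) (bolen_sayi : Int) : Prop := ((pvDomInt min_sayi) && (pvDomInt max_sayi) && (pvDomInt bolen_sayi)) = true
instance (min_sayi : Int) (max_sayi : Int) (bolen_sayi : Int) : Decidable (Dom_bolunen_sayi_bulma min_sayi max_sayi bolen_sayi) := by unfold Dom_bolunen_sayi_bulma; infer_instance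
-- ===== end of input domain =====

-- B replaces A's scan of every integer in [min,max] with a stepped range over the multiples of |bolen_sayi| (faster: asymptotic, measured).


-- ===== PORT A =====
def bolunen_sayi_bulma (min_sayi : Int) (max_sayi : Int) (bolen_sayi : Int) : List Int × Int :=
  (PySem.List.pyRange min_sayi (max_sayi + 1) 1).foldl
    (fun st sayi =>
      if PySem.Int.mod sayi bolen_sayi == 0 then (st.1 ++ [sayi], st.2 + 1) else st)
    ([], 0)

-- ===== PORT B =====
def bolunen_sayi_bulma_alt (min_sayi : Int) (max_sayi : Int) (bolen_sayi : Int) : List Int × Int :=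
  if max_sayi < min_sayi then ([], 0)
  else
    let step := |bolen_sayi|
    let start := min_sayi + PySem.Int.mod (-min_sayi) step
    let tam_bolunenler := PySem.List.pyRange start (max_sayi + 1) step
    (tam_bolunenler, (tam_bolunenler.length : Int))

-- ===== PRECONDITION & SPEC =====
-- Pre_ excludes exactly the inputs where Python A raises ZeroDivisionError: bolen_sayi = 0 with a nonempty range (B raises there too).
def Pre_bolunen_sayi_bulma (min_sayi : Int) (max_sayi : Int) (bolen_sayi : Int) : Prop :=
  bolen_sayi ≠ 0 ∨ max_sayi < min_sayi
instance (min_sayi : Int) (max_sayi : Int) (bolen_sayi : Int) : Decidable (Pre_bolunen_sayi_bulma min_sayi max_sayi bolen_sayi) := by unfold Pre_bolunen_sayi_bulma; infer_instance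
def pvWitness_bolunen_sayi_bulma : Int × Int × Int := (1, 10, 3)

def Spec_bolunen_sayi_bulma (min_sayi : Int) (max_sayi : Int) (bolen_sayi : Int) (out : List Int × Int) : Prop := out = bolunen_sayi_bulma_alt min_sayi max_sayi bolen_sayi
instance (min_sayi : Int) (max_sayi : Int) (bolen_sayi : Int) (out : List Int × Int) : Decidable (Spec_bolunen_sayi_bulma min_sayi max_sayi bolen_sayi out) := by unfold Spec_bolunen_sayi_bulma; infer_instance

-- ===== CLAIM (what is proved, stated in full; the proofs are below) =====
def Claim_equal_bolunen_sayi_bulma : Prop := ∀ (min_sayi : Int) (max_sayi : Int) (bolen_sayi : Int), Dom_bolunen_sayi_bulma min_sayi max_sayi bolen_sayi → Pre_bolunen_sayi_bulma min_sayi max_sayi bolen_sayi → Spec_bolunen_sayi_bulma min_sayi max_sayi bolen_sayi (bolunen_sayi_bulma min_sayi max_sayi bolen_sayi)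

-- ===== LEMMAS AND PROOFS =====

-- A's fold accumulates exactly (filter, its length).
theorem foldl_pair_filter (p : Int → Bool) (L : List Int) (acc : List Int) (c : Int) :
    L.foldl (fun st x => if p x then (st.1 ++ [x], st.2 + 1) else st) (acc, c)
      = (acc ++ L.filter p, c + ((L.filter p).length : Int)) := by
  induction L generalizing acc c with
  | nil => simp
  | cons x t ih =>
    by_cases h : p x
    · simp [h, ih]; ring
    · simp [h, ih]

-- pyRange with positive step is empty when the bounds cross.
theorem pyRange_pos_nil (a b s : Int) (hs : 0 < s) (h : b ≤ a) :
    PySem.List.pyRange a b s = [] := by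
  rw [PySem.List.pyRange_of_pos a b hs]
  simp [not_lt.mpr h]

-- cons form of pyRange for an arbitrary positive step.
theorem pyRange_pos_cons (a b s : Int) (hs : 0 < s) (h : a < b) :
    PySem.List.pyRange a b s = a :: PySem.List.pyRange (a + s) b s := by
  rw [PySem.List.pyRange_of_pos a b hs, PySem.List.pyRange_of_pos (a + s) b hs]
  have hD : 0 ≤ b - a - 1 := by omega
  have hdiv : (b - a + s - 1) / s = (b - a - 1) / s + 1 := by
    have h1 : b - a + s - 1 = (b - a - 1) + 1 * s := by ring
    rw [h1, Int.add_mul_ediv_right _ _ (by omega : s ≠ 0)]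
  have hq0 : 0 ≤ (b - a - 1) / s := Int.ediv_nonneg hD hs.le
  have hN : ((b - a + s - 1) / s).toNat = ((b - a - 1) / s).toNat + 1 := by
    rw [hdiv]; omega
  by_cases h2 : a + s < b
  · have hM : b - (a + s) + s - 1 = b - a - 1 := by ring
    simp only [if_pos h, if_pos h2, hM, hN, List.range_succ_eq_map, List.map_cons, List.map_map]
    congr 1
    · simp
    · apply List.map_congr_left
      intro k _
      simp [Function.comp]
      ring
  · have hz : (b - a - 1) / s = 0 := Int.ediv_eq_zero_of_lt hD (by omega)
    simp only [if_pos h, if_neg h2, hN, hz]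
    simp

-- the filtered consecutive range IS the stepped range of multiples.
theorem filter_range_eq (b : Int) (hb : b ≠ 0) :
    ∀ (n : Nat) (mn mxp : Int), (mxp - mn).toNat = n →
      (PySem.List.pyRange mn mxp 1).filter (fun x => PySem.Int.mod x b == 0)
        = PySem.List.pyRange (mn + PySem.Int.mod (-mn) |b|) mxp |b| := by
  have hs : 0 < |b| := abs_pos.mpr hb
  intro n
  induction n with
  | zero =>
    intro mn mxp hn
    have hle : mxp ≤ mn := by omega
    rw [PySem.List.pyRange_one_eq_nil hle]
    rw [PySem.Int.mod_eq_emod_of_pos hs]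
    have h0 : 0 ≤ (-mn) % |b| := Int.emod_nonneg _ (by omega)
    rw [pyRange_pos_nil _ _ _ hs (by omega)]
    simp
  | succ n ih =>
    intro mn mxp hn
    have hlt : mn < mxp := by omega
    rw [PySem.List.pyRange_one_cons hlt]
    rw [PySem.Int.mod_eq_emod_of_pos hs]
    have hr0 : 0 ≤ (-mn) % |b| := Int.emod_nonneg _ (by omega)
    have hrlt : (-mn) % |b| < |b| := Int.emod_lt_of_pos _ hs
    have ihh := ih (mn + 1) mxp (by omega)
    rw [PySem.Int.mod_eq_emod_of_pos hs] at ihh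
    by_cases hdvd : b ∣ mn
    · have habs : |b| ∣ mn := (abs_dvd b mn).mpr hdvd
      have hr : (-mn) % |b| = 0 := Int.emod_eq_zero_of_dvd (dvd_neg.mpr habs)
      have hp : (PySem.Int.mod mn b == 0) = true := by
        simp [PySem.Int.mod_eq_zero_iff_dvd, hdvd]
      have hr' : (-(mn + 1)) % |b| = |b| - 1 := by
        have e1 : (-(mn + 1)) % |b| = (-1) % |b| := by
          rw [Int.emod_eq_emod_iff_emod_sub_eq_zero]
          have : -(mn + 1) - (-1) = -mn := by ring
          rw [this]; exact hr
        have e2 : (-1 : Int) % |b| = (|b| - 1) % |b| := by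
          rw [Int.emod_eq_emod_iff_emod_sub_eq_zero]
          have : (-1 : Int) - (|b| - 1) = (-1) * |b| := by ring
          rw [this]
          exact Int.mul_emod_left _ _
        rw [e1, e2, Int.emod_eq_of_lt (by omega) (by omega)]
      simp only [List.filter_cons, hp, if_true]
      rw [hr', show mn + 1 + (|b| - 1) = mn + |b| by ring] at ihh
      rw [hr, show mn + (0 : Int) = mn by ring, pyRange_pos_cons mn mxp |b| hs hlt, ihh]
    · have habs : ¬ |b| ∣ mn := fun h => hdvd ((abs_dvd b mn).mp h)
      have hrne : (-mn) % |b| ≠ 0 := by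
        intro h
        exact habs (dvd_neg.mp (Int.dvd_of_emod_eq_zero h))
      have hp : (PySem.Int.mod mn b == 0) = false := by
        simp [PySem.Int.mod_eq_zero_iff_dvd, hdvd]
      have hr' : (-(mn + 1)) % |b| = (-mn) % |b| - 1 := by
        have e1 : (-(mn + 1)) % |b| = ((-mn) % |b| - 1) % |b| := by
          rw [Int.emod_eq_emod_iff_emod_sub_eq_zero]
          have : -(mn + 1) - ((-mn) % |b| - 1) = -mn - (-mn) % |b| := by ring
          rw [this, Int.sub_emod, Int.emod_emod_of_dvd _ dvd_rfl]
          simp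
        rw [e1, Int.emod_eq_of_lt (by omega) (by omega)]
      simp only [List.filter_cons, hp, Bool.false_eq_true, if_false]
      rw [hr', show mn + 1 + (-mn % |b| - 1) = mn + -mn % |b| by ring] at ihh
      exact ihh

theorem bolunen_sayi_bulma_spec : Claim_equal_bolunen_sayi_bulma := by
  intro mn mx b _ hpre
  unfold Spec_bolunen_sayi_bulma bolunen_sayi_bulma bolunen_sayi_bulma_alt
  by_cases hlt : mx < mn
  · rw [PySem.List.pyRange_one_eq_nil (by omega)]
    simp [hlt]
  · have hb : b ≠ 0 := by
      rcases hpre with h | h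
      · exact h
      · omega
    rw [foldl_pair_filter (fun x => PySem.Int.mod x b == 0)]
    rw [filter_range_eq b hb (mx + 1 - mn).toNat mn (mx + 1) rfl]
    simp [hlt]
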